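-- pv_equiv track=rewrite | github.com/alandtse/agentic-renderdoc | src/extension/utilities.py | _first_line
-- ===== SOURCE A (Python) =====
-- from typing import Any, Callable, Dict, List, Optional, Tuple
--
-- def _first_line(doc: Optional[str]) -> Optional[str]:
--     """Return the first non-empty line of a docstring, or None."""
--     if not doc:
--         return None
--     for line in doc.strip().split("\n"):
--         stripped = line.strip()
--         if stripped:
--             return stripped
--     return None
-- ===== SOURCE B (Python) =====
-- def _first_line(doc):
--     """Return the first non-empty line of a docstring, or None."""
--     if not doc:
--         return None
--     s = doc.strip()
--     if not s:
--         return None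
--     return s.split("\n", 1)[0].strip()
-- ===== Notes on version B (the rewrite author's own statement) =====
-- stated objective: simpler
-- what changed: A loops over all newline-separated lines of the stripped docstring looking for the first whose strip() is non-empty; B exploits that a stripped string cannot start with whitespace, so its first line is already non-empty and B returns it directly via a single maxsplit-1 split, with no loop.
import Mathlib
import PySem

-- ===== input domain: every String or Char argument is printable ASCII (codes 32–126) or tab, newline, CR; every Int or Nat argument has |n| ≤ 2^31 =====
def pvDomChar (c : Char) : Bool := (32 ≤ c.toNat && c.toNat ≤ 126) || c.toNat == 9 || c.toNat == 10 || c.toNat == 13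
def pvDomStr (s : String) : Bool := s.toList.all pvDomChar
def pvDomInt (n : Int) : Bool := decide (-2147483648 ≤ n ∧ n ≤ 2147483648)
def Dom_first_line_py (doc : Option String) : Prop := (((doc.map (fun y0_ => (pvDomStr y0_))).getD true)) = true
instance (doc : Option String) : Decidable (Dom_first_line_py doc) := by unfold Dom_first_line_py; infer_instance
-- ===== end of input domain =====

-- B replaces A's scan-over-all-lines loop by a single first-line extraction:
-- doc.strip() cannot start with whitespace, so its first line is already the
-- first non-empty one (objective: simpler).

-- ===== PORT A =====
-- A's 'for line in …: stripped = line.strip(); if stripped: return stripped' loop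
def pvFirstNonEmptyStripped : List String → Option String
  | [] => none
  | line :: rest =>
    let stripped := PySem.Str.strip line
    if stripped ≠ "" then some stripped else pvFirstNonEmptyStripped rest

def first_line_py (doc : Option String) : Option String :=
  match doc with
  | none => none
  | some d =>
    if d = "" then none
    else
      match PySem.Str.split? (PySem.Str.strip d) "\n" with
      | some lines => pvFirstNonEmptyStripped lines
      | none => none  -- unreachable: the separator "\n" is non-empty

-- ===== PORT B =====
def first_line_py_alt (doc : Option String) : Option String :=
  match doc with
  | none => none
  | some d =>
    let s := PySem.Str.strip d
    if s = "" then none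
    else
      match PySem.Str.splitMax? s "\n" 1 with
      | some (first :: _) => some (PySem.Str.strip first)
      | _ => none  -- unreachable: "\n" ≠ "" and s.split(…) is never empty

-- ===== PRECONDITION & SPEC =====
def Spec_first_line_py (doc : Option String) (out : Option String) : Prop := out = first_line_py_alt doc
instance (doc : Option String) (out : Option String) : Decidable (Spec_first_line_py doc out) := by unfold Spec_first_line_py; infer_instance

-- ===== CLAIM (what is proved, stated in full; the proofs are below) =====
def Claim_equal_first_line_py : Prop := ∀ (doc : Option String), Dom_first_line_py doc → Spec_first_line_py doc (first_line_py doc)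

-- ===== LEMMAS AND PROOFS =====

-- accumulator lemma for splitOn.go
theorem pv_go_acc (fuel : ℕ) : ∀ (l cur : List Char) (acc : List (List Char)),
    PySem.Chars.splitOn.go ['\n'] fuel l cur acc
      = acc.reverse ++ PySem.Chars.splitOn.go ['\n'] fuel l cur [] := by
  induction fuel with
  | zero => intro l cur acc; simp [PySem.Chars.splitOn.go]
  | succ n ih =>
    intro l cur acc
    cases l with
    | nil => simp [PySem.Chars.splitOn.go]
    | cons c rest =>
      rw [PySem.Chars.splitOn.go, PySem.Chars.splitOn.go]
      by_cases h : List.isPrefixOf ['\n'] (c :: rest)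
      · simp only [h, if_true]
        rw [ih _ _ (cur.reverse :: acc), ih _ _ [cur.reverse]]
        simp
      · simp only [h]
        exact ih _ _ _

-- the head of splitOn.go is the segment before the first '\n'
theorem pv_go_head : ∀ (fuel : ℕ) (l cur : List Char), l.length < fuel →
    (PySem.Chars.splitOn.go ['\n'] fuel l cur []).head?
      = some (cur.reverse ++ l.takeWhile (fun c => c != '\n')) := by
  intro fuel
  induction fuel with
  | zero => intro l cur h; omega
  | succ n ih =>
    intro l cur h
    cases l with
    | nil => simp [PySem.Chars.splitOn.go]
    | cons c rest =>
      rw [PySem.Chars.splitOn.go]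
      by_cases hp : List.isPrefixOf ['\n'] (c :: rest)
      · have hc : c = '\n' := by
          simp [List.isPrefixOf] at hp; exact hp.symm
        simp only [hp, if_true]
        rw [pv_go_acc]
        simp [hc, List.takeWhile]
      · have hc : c ≠ '\n' := by
          intro hc; apply hp; simp [List.isPrefixOf, hc]
        simp only [hp, Bool.false_eq_true, ite_false]
        rw [ih rest (c :: cur) (by simpa using Nat.lt_of_succ_lt_succ h)]
        have hcb : (c != '\n') = true := by simp [hc]
        simp [List.takeWhile, hcb]

-- the same two lemmas for splitOnMax.go
theorem pv_goMax_acc (fuel : ℕ) : ∀ (m : ℕ) (l cur : List Char) (acc : List (List Char)),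
    PySem.Chars.splitOnMax.go ['\n'] fuel m l cur acc
      = acc.reverse ++ PySem.Chars.splitOnMax.go ['\n'] fuel m l cur [] := by
  induction fuel with
  | zero => intro m l cur acc; simp [PySem.Chars.splitOnMax.go]
  | succ n ih =>
    intro m l cur acc
    cases l with
    | nil => simp [PySem.Chars.splitOnMax.go]
    | cons c rest =>
      rw [PySem.Chars.splitOnMax.go, PySem.Chars.splitOnMax.go]
      by_cases hm : m = 0
      · simp [hm]
      · simp only [hm, if_false]
        by_cases h : List.isPrefixOf ['\n'] (c :: rest)
        · simp only [h, if_true]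
          rw [ih _ _ _ (cur.reverse :: acc), ih _ _ _ [cur.reverse]]
          simp
        · simp only [h, Bool.false_eq_true, ite_false]
          exact ih _ _ _ _

theorem pv_goMax_head : ∀ (fuel m : ℕ) (l cur : List Char), m ≠ 0 → l.length < fuel →
    (PySem.Chars.splitOnMax.go ['\n'] fuel m l cur []).head?
      = some (cur.reverse ++ l.takeWhile (fun c => c != '\n')) := by
  intro fuel
  induction fuel with
  | zero => intro m l cur hm h; omega
  | succ n ih =>
    intro m l cur hm h
    cases l with
    | nil => simp [PySem.Chars.splitOnMax.go]
    | cons c rest =>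
      rw [PySem.Chars.splitOnMax.go]
      simp only [hm, if_false]
      by_cases hp : List.isPrefixOf ['\n'] (c :: rest)
      · have hc : c = '\n' := by
          simp [List.isPrefixOf] at hp; exact hp.symm
        simp only [hp, if_true]
        rw [pv_goMax_acc]
        simp [hc, List.takeWhile]
      · have hc : c ≠ '\n' := by
          intro hc; apply hp; simp [List.isPrefixOf, hc]
        simp only [hp, Bool.false_eq_true, ite_false]
        rw [ih m rest (c :: cur) hm (by simpa using Nat.lt_of_succ_lt_succ h)]
        have hcb : (c != '\n') = true := by simp [hc]
        simp [List.takeWhile, hcb]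

theorem pv_dropWhile_head {p : Char → Bool} : ∀ (xs : List Char) (c : Char) (t : List Char),
    List.dropWhile p xs = c :: t → p c = false := by
  intro xs
  induction xs with
  | nil => intro c t h; simp [List.dropWhile] at h
  | cons a rest ih =>
    intro c t h
    by_cases ha : p a
    · rw [List.dropWhile_cons_of_pos ha] at h; exact ih c t h
    · rw [List.dropWhile_cons_of_neg ha] at h
      cases h; simpa using ha

theorem pv_rstrip_prefix (ys : List Char) : PySem.Chars.rstrip ys <+: ys := by
  unfold PySem.Chars.rstrip
  have h : List.dropWhile PySem.Chars.isspace ys.reverse <:+ ys.reverse :=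
    List.dropWhile_suffix _
  have h2 := h.reverse
  simpa using h2

-- the head of a non-empty stripped string is not whitespace
theorem pv_strip_head (xs : List Char) (c : Char) (t : List Char)
    (h : PySem.Chars.strip xs = c :: t) : PySem.Chars.isspace c = false := by
  unfold PySem.Chars.strip at h
  have hpre := pv_rstrip_prefix (PySem.Chars.lstrip xs)
  rw [h] at hpre
  obtain ⟨u, hu⟩ := hpre
  unfold PySem.Chars.lstrip at hu
  exact pv_dropWhile_head xs c (t ++ u) (by simpa using hu.symm)

-- a string whose head is not whitespace strips to something non-empty
theorem pv_strip_ne_nil (c : Char) (t : List Char) (hc : PySem.Chars.isspace c = false) :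
    PySem.Chars.strip (c :: t) ≠ [] := by
  unfold PySem.Chars.strip PySem.Chars.lstrip PySem.Chars.rstrip
  rw [List.dropWhile_cons_of_neg (by simp [hc])]
  intro hnil
  have h2 : List.dropWhile PySem.Chars.isspace (c :: t).reverse = [] := by
    simpa using hnil
  rw [List.dropWhile_eq_nil_iff] at h2
  have := h2 c (by simp)
  simp [hc] at this

theorem pv_splitOn_head (cs : List Char) :
    (PySem.Chars.splitOn cs ['\n']).head? = some (cs.takeWhile (fun c => c != '\n')) := by
  unfold PySem.Chars.splitOn
  rw [pv_go_head (cs.length + 1) cs [] (Nat.lt_succ_self _)]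
  simp

theorem pv_splitOnMax_head (cs : List Char) :
    (PySem.Chars.splitOnMax cs ['\n'] 1).head? = some (cs.takeWhile (fun c => c != '\n')) := by
  unfold PySem.Chars.splitOnMax
  rw [if_neg (by norm_num)]
  rw [pv_goMax_head (cs.length + 1) _ cs [] (by norm_num) (Nat.lt_succ_self _)]
  simp

theorem pv_toList_eq_nil (s : String) : (s = "") ↔ s.toList = [] := by
  constructor
  · intro h; simp [h]
  · intro h; exact String.toList_injective (by simpa using h)

-- the non-empty-doc case of the equivalence
theorem pv_main (d : String) :
    (match PySem.Str.split? (PySem.Str.strip d) "\n" with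
      | some lines => pvFirstNonEmptyStripped lines
      | none => none)
    = (let s := PySem.Str.strip d;
       if s = "" then none
       else match PySem.Str.splitMax? s "\n" 1 with
        | some (first :: _) => some (PySem.Str.strip first)
        | _ => none) := by
  have hsl : (PySem.Str.strip d).toList = PySem.Chars.strip d.toList := by simp
  have hA : PySem.Str.split? (PySem.Str.strip d) "\n"
      = some ((PySem.Chars.splitOn (PySem.Chars.strip d.toList) ['\n']).map String.ofList) := by
    unfold PySem.Str.split? PySem.Chars.split?
    rw [hsl]
    simp [show ("\n" : String).toList = ['\n'] from by decide]
  have hB : PySem.Str.splitMax? (PySem.Str.strip d) "\n" 1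
      = some ((PySem.Chars.splitOnMax (PySem.Chars.strip d.toList) ['\n'] 1).map String.ofList) := by
    unfold PySem.Str.splitMax? PySem.Chars.splitMax?
    rw [hsl]
    simp [show ("\n" : String).toList = ['\n'] from by decide]
  rw [hA]
  cases hnil : PySem.Chars.strip d.toList with
  | nil =>
    have hs : PySem.Str.strip d = "" := (pv_toList_eq_nil _).mpr (by rw [hsl, hnil])
    rw [hs]
    decide
  | cons c t =>
    have hs : PySem.Str.strip d ≠ "" := by
      intro h; rw [(pv_toList_eq_nil _).mp h] at hsl; rw [hnil] at hsl; simp at hsl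
    simp only [hs]
    rw [hB, hnil]
    obtain ⟨rest, hr⟩ : ∃ rest, PySem.Chars.splitOn (c :: t) ['\n']
        = ((c :: t).takeWhile (fun x => x != '\n')) :: rest := by
      have := pv_splitOn_head (c :: t)
      cases hsp : PySem.Chars.splitOn (c :: t) ['\n'] with
      | nil => rw [hsp] at this; simp at this
      | cons a r => rw [hsp] at this; simp at this; exact ⟨r, by rw [this]⟩
    obtain ⟨rest2, hr2⟩ : ∃ rest2, PySem.Chars.splitOnMax (c :: t) ['\n'] 1
        = ((c :: t).takeWhile (fun x => x != '\n')) :: rest2 := by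
      have := pv_splitOnMax_head (c :: t)
      cases hsp : PySem.Chars.splitOnMax (c :: t) ['\n'] 1 with
      | nil => rw [hsp] at this; simp at this
      | cons a r => rw [hsp] at this; simp at this; exact ⟨r, by rw [this]⟩
    rw [hr, hr2]
    have hcsp : PySem.Chars.isspace c = false := pv_strip_head d.toList c t hnil
    have hcne : c ≠ '\n' := by
      intro h; rw [h] at hcsp; exact absurd hcsp (by decide)
    have htw : (c :: t).takeWhile (fun x => x != '\n') = c :: t.takeWhile (fun x => x != '\n') := by
      simp [List.takeWhile, show (c != '\n') = true from by simp [hcne]]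
    have hne : PySem.Str.strip (String.ofList ((c :: t).takeWhile (fun x => x != '\n'))) ≠ "" := by
      intro h
      have h2 := (pv_toList_eq_nil _).mp h
      rw [show (PySem.Str.strip (String.ofList ((c :: t).takeWhile (fun x => x != '\n')))).toList
          = PySem.Chars.strip ((c :: t).takeWhile (fun x => x != '\n')) from by simp] at h2
      rw [htw] at h2
      exact pv_strip_ne_nil c _ hcsp h2
    simp only [List.map_cons]
    unfold pvFirstNonEmptyStripped
    simp [hne]

-- ===== VERDICT (by name: the statement is the Claim_ definition above) =====
theorem first_line_py_spec : Claim_equal_first_line_py := by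
  intro doc _
  unfold Spec_first_line_py
  cases doc with
  | none => rfl
  | some d =>
    by_cases hd : d = ""
    · subst hd; decide
    · have hA : first_line_py (some d)
          = (match PySem.Str.split? (PySem.Str.strip d) "\n" with
             | some lines => pvFirstNonEmptyStripped lines
             | none => none) := by
        rw [show first_line_py (some d)
            = (if d = "" then none
               else match PySem.Str.split? (PySem.Str.strip d) "\n" with
                 | some lines => pvFirstNonEmptyStripped lines
                 | none => none) from rfl, if_neg hd]
      rw [hA]
      exact pv_main d
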